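-- pv_equiv track=rewrite | github.com/Massprod/leetcode-testing | leetcode_problems/p2640_find_the_score_of_all_prefixes_of_an_array.py | find_prefix_score
-- ===== SOURCE A (Python) =====
-- def find_prefix_score(nums: list[int]) -> list[int]:
--     # working_sol: (54.86%, 36.22%) -> (39ms, 42.23mb)  time: O(n) | space: O(n)
--     max_prefix: int = nums[0]
--     conv_sum: int = nums[0] + max_prefix
--     # [ max_value_before + sum of conv_array ]
--     out: list[int] = [conv_sum]
--     for index in range(1, len(nums)):
--         value: int = nums[index]
--         max_prefix = max(max_prefix, value)
--         conv_sum += value + max_prefix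
--         out.append(conv_sum)
--
--     return out
-- ===== SOURCE B (Python) =====
-- def find_prefix_score(nums: list[int]) -> list[int]:
--     # Three separate passes: running-max table, conversion table, prefix sums.
--     running_max = []
--     cur = None
--     for x in nums:
--         cur = x if cur is None or x > cur else cur
--         running_max.append(cur)
--     conv = [n + m for n, m in zip(nums, running_max)]
--     out = []
--     total = 0
--     for c in conv:
--         total += c
--         out.append(total)
--     return out
-- ===== Notes on version B (the rewrite author's own statement) =====
-- stated objective: alternative
-- what changed: Replaces A's single fused loop carrying three pieces of state with three independent passes: a running-maximum table, a conversion list built by zipping, and a final prefix-sum accumulation; B also returns [] on the empty list where A raises.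
-- outside the precondition, e.g. on find_prefix_score([]): A raises IndexError, B returns []
import Mathlib
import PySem

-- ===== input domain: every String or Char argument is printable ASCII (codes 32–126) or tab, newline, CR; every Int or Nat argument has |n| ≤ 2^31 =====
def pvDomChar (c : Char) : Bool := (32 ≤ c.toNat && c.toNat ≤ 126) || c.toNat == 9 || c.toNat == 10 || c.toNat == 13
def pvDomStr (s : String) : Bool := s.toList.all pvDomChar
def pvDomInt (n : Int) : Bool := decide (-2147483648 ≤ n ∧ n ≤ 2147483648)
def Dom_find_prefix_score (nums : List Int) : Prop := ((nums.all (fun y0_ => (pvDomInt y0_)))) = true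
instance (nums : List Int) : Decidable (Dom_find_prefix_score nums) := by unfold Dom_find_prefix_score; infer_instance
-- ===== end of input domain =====

-- B builds the result in three separate passes (running-max table, conversion list, prefix sums)
-- instead of A's single fused loop; same O(n) cost. B returns [] on the empty list where A raises.

-- ===== PORT A =====
-- A's `for index in range(1, len(nums))` reads nums[index] for index = 1 .. len-1,
-- i.e. it visits exactly the elements of nums.tail in order; ported as a fold over the tail
-- with the same state (max_prefix, conv_sum, out).
def find_prefix_score (nums : List Int) : List Int :=
  match nums with
  | [] => []  -- unreachable under Pre_ (Python raises IndexError on nums[0])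
  | h :: t =>
    let s := t.foldl
      (fun (st : Int × Int × List Int) value =>
        let mp := max st.1 value
        let cs := st.2.1 + (value + mp)
        (mp, cs, st.2.2 ++ [cs]))
      (h, h + h, [h + h])
    s.2.2

-- ===== PORT B =====
def find_prefix_score_alt (nums : List Int) : List Int :=
  let rm := (nums.foldl
    (fun (st : Option Int × List Int) x =>
      let cur : Int := match st.1 with
        | none => x
        | some c => if x > c then x else c
      (some cur, st.2 ++ [cur]))
    (none, ([] : List Int))).2
  let conv := (nums.zip rm).map (fun p => p.1 + p.2)
  (conv.foldl (fun (st : Int × List Int) c => (st.1 + c, st.2 ++ [st.1 + c]))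
    (0, ([] : List Int))).2

-- ===== PRECONDITION & SPEC =====
-- A raises IndexError on the empty list (nums[0]); Pre_ excludes exactly that input.
def Pre_find_prefix_score (nums : List Int) : Prop := nums ≠ []
instance (nums : List Int) : Decidable (Pre_find_prefix_score nums) := by
  unfold Pre_find_prefix_score; infer_instance
def pvWitness_find_prefix_score : List Int := [2, 3, 7, 5, 10]

def Spec_find_prefix_score (nums : List Int) (out : List Int) : Prop := out = find_prefix_score_alt nums
instance (nums : List Int) (out : List Int) : Decidable (Spec_find_prefix_score nums out) := by unfold Spec_find_prefix_score; infer_instance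

-- ===== CLAIM (what is proved, stated in full; the proofs are below) =====
def Claim_equal_find_prefix_score : Prop := ∀ (nums : List Int), Dom_find_prefix_score nums → Pre_find_prefix_score nums → Spec_find_prefix_score nums (find_prefix_score nums)

-- ===== LEMMAS AND PROOFS =====

-- reference: list of running maxima of t, seeded with c
def rmax (c : Int) : List Int → List Int
  | [] => []
  | x :: t => max c x :: rmax (max c x) t

-- reference: prefix sums of l starting from s
def psum (s : Int) : List Int → List Int
  | [] => []
  | x :: t => (s + x) :: psum (s + x) t

-- A's fused loop produces out ++ the prefix sums of the conversion list
theorem foldA_eq (t : List Int) : ∀ (mp cs : Int) (out : List Int),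
    (t.foldl
      (fun (st : Int × Int × List Int) value =>
        let mp := max st.1 value
        let cs := st.2.1 + (value + mp)
        (mp, cs, st.2.2 ++ [cs]))
      (mp, cs, out)).2.2
    = out ++ psum cs (List.zipWith (· + ·) t (rmax mp t)) := by
  induction t with
  | nil => intro mp cs out; simp [psum]
  | cons x t ih =>
    intro mp cs out
    simp only [List.foldl_cons, rmax, List.zipWith, psum]
    rw [ih]
    simp [List.append_assoc]

-- B's running-max fold (with a some-state) produces acc ++ rmax c l
theorem foldB_rm (l : List Int) : ∀ (c : Int) (acc : List Int),
    (l.foldl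
      (fun (st : Option Int × List Int) x =>
        let cur : Int := match st.1 with
          | none => x
          | some c => if x > c then x else c
        (some cur, st.2 ++ [cur]))
      (some c, acc)).2 = acc ++ rmax c l := by
  induction l with
  | nil => intro c acc; simp [rmax]
  | cons x l ih =>
    intro c acc
    simp only [List.foldl_cons, rmax]
    have hmax : (if x > c then x else c) = max c x := by
      rcases lt_or_ge c x with h | h
      · simp [h, max_eq_right h.le]
      · have : ¬ x > c := not_lt.mpr h
        simp [this, max_eq_left h]
    rw [hmax, ih]
    simp

-- B's prefix-sum fold produces acc ++ psum s l
theorem foldB_ps (l : List Int) : ∀ (s : Int) (acc : List Int),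
    (l.foldl (fun (st : Int × List Int) c => (st.1 + c, st.2 ++ [st.1 + c]))
      (s, acc)).2 = acc ++ psum s l := by
  induction l with
  | nil => intro s acc; simp [psum]
  | cons x l ih =>
    intro s acc
    simp only [List.foldl_cons, psum]
    rw [ih]
    simp

theorem zip_map_add (l r : List Int) :
    (l.zip r).map (fun p => p.1 + p.2) = List.zipWith (· + ·) l r := by
  induction l generalizing r with
  | nil => simp
  | cons x l ih =>
    cases r with
    | nil => simp
    | cons y r => simp [List.zip_cons_cons, ih]

-- ===== VERDICT (by name: the statement is the Claim_ definition above) =====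
theorem find_prefix_score_spec : Claim_equal_find_prefix_score := by
  intro nums _hdom hpre
  unfold Spec_find_prefix_score
  match nums with
  | [] => exact absurd rfl hpre
  | h :: t =>
    show find_prefix_score (h :: t) = find_prefix_score_alt (h :: t)
    unfold find_prefix_score find_prefix_score_alt
    simp only [List.foldl_cons]
    rw [foldA_eq, foldB_rm, zip_map_add]
    simp only [List.nil_append]
    rw [foldB_ps]
    simp [psum]
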